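-- pv_equiv track=rewrite | github.com/dan-blanchard/advent-of-code-2025 | 5/py/solve.py | find_fresh_ingredients
-- ===== SOURCE A (Python) =====
-- def find_fresh_ingredients(fresh_ranges, available_ingredients):
--     fresh_ingredients = set()
--     for ingredient in available_ingredients:
--         for start, end in fresh_ranges:
--             if start <= ingredient <= end:
--                 fresh_ingredients.add(ingredient)
--                 break
--     return fresh_ingredients
-- ===== SOURCE B (Python) =====
-- def find_fresh_ingredients(fresh_ranges, available_ingredients):
--     # Merge ranges (sorted by start), then binary-search each ingredient.
--     merged = []
--     for s, e in sorted(fresh_ranges, key=lambda r: r[0]):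
--         if merged and s <= merged[-1][1]:
--             ls, le = merged[-1]
--             merged[-1] = (ls, max(le, e))
--         else:
--             merged.append((s, e))
--     fresh_ingredients = set()
--     for x in available_ingredients:
--         lo, hi = 0, len(merged)
--         while lo < hi:
--             mid = (lo + hi) // 2
--             if merged[mid][0] <= x:
--                 lo = mid + 1
--             else:
--                 hi = mid
--         if lo > 0 and x <= merged[lo - 1][1]:
--             fresh_ingredients.add(x)
--     return fresh_ingredients
-- ===== Notes on version B (the rewrite author's own statement) =====
-- stated objective: faster
-- what changed: Instead of scanning all ranges for every ingredient, B sorts the ranges once, merges overlapping ones, and tests each ingredient with a binary search over the merged ranges.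
import Mathlib
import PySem

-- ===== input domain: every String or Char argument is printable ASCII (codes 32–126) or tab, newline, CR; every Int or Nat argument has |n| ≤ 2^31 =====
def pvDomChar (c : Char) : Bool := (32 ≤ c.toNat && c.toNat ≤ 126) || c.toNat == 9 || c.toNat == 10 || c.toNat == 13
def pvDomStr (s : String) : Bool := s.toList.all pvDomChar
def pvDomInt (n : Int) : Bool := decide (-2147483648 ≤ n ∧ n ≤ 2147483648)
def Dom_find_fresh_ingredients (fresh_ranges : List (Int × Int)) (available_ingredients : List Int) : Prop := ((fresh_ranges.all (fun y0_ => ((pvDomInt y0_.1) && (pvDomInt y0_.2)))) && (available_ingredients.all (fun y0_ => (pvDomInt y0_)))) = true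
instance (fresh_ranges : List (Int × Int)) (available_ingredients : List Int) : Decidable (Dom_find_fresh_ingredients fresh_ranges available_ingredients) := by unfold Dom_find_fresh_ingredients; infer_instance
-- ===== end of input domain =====

-- B replaces A's per-ingredient scan over all ranges by sort-merge-then-binary-search (objective: faster).
-- ===== PORT A =====
-- A's inner 'for start, end in fresh_ranges: … break' loop: true iff some range contains x
def coversA (ranges : List (Int × Int)) (x : Int) : Bool :=
  match ranges with
  | [] => false
  | (s, e) :: rest => if s ≤ x ∧ x ≤ e then true else coversA rest x

def find_fresh_ingredients (fresh_ranges : List (Int × Int)) (available_ingredients : List Int) : List Int :=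
  available_ingredients.foldl
    (fun acc ingredient => if coversA fresh_ranges ingredient then PySem.Set.add acc ingredient else acc)
    []

-- ===== PORT B =====
-- one step of Source B's merge loop (appends at the end, updates merged[-1] in place)
def mergeStep (merged : List (Int × Int)) (r : Int × Int) : List (Int × Int) :=
  match merged.getLast? with
  | some (ls, le) =>
      if r.1 ≤ le then merged.dropLast ++ [(ls, max le r.2)]
      else merged ++ [r]
  | none => [r]

-- Source B's hand-written 'while lo < hi' binary-search loop (bisect_right on the starts)
def bsLoop (a : List (Int × Int)) (x : Int) (lo hi : Nat) : Nat :=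
  if _h : lo < hi then
    let mid := (lo + hi) / 2
    if (a.getD mid (0, 0)).1 ≤ x then bsLoop a x (mid + 1) hi
    else bsLoop a x lo mid
  else lo
termination_by hi - lo
decreasing_by all_goals omega

def find_fresh_ingredients_alt (fresh_ranges : List (Int × Int)) (available_ingredients : List Int) : List Int :=
  let merged := (PySem.List.sorted fresh_ranges (fun r => r.1) false).foldl mergeStep []
  available_ingredients.foldl
    (fun acc x =>
      let lo := bsLoop merged x 0 merged.length
      if 0 < lo ∧ x ≤ (merged.getD (lo - 1) (0, 0)).2 then PySem.Set.add acc x else acc)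
    []

-- ===== PRECONDITION & SPEC =====
def Spec_find_fresh_ingredients (fresh_ranges : List (Int × Int)) (available_ingredients : List Int) (out : List Int) : Prop := out = find_fresh_ingredients_alt fresh_ranges available_ingredients
instance (fresh_ranges : List (Int × Int)) (available_ingredients : List Int) (out : List Int) : Decidable (Spec_find_fresh_ingredients fresh_ranges available_ingredients out) := by unfold Spec_find_fresh_ingredients; infer_instance

-- ===== CLAIM (what is proved, stated in full; the proofs are below) =====
def Claim_equal_find_fresh_ingredients : Prop := ∀ (fresh_ranges : List (Int × Int)) (available_ingredients : List Int), Dom_find_fresh_ingredients fresh_ranges available_ingredients → Spec_find_fresh_ingredients fresh_ranges available_ingredients (find_fresh_ingredients fresh_ranges available_ingredients)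

-- ===== LEMMAS AND PROOFS =====

-- point-membership in a list of closed ranges
def covers (l : List (Int × Int)) (x : Int) : Prop := ∃ p ∈ l, p.1 ≤ x ∧ x ≤ p.2

lemma covers_append (a b : List (Int × Int)) (x : Int) :
    covers (a ++ b) x ↔ covers a x ∨ covers b x := by
  simp [covers, or_and_right, exists_or]

lemma coversA_iff (l : List (Int × Int)) (x : Int) : coversA l x = true ↔ covers l x := by
  induction l with
  | nil => simp [coversA, covers]
  | cons p rest ih =>
      obtain ⟨s, e⟩ := p
      simp only [coversA]
      by_cases h : s ≤ x ∧ x ≤ e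
      · simp [h, covers]
      · simp [h, ih, covers]

-- invariant of Source B's merged list: start-sorted, strictly separated intervals
def SepIv (p q : Int × Int) : Prop := p.1 ≤ q.1 ∧ p.2 < q.1

-- one merge step: structure and point-set, assuming the new start is ≥ every start in m
lemma mergeStep_spec (m : List (Int × Int)) (s e : Int)
    (hm : m.Pairwise SepIv) (hstart : ∀ p ∈ m, p.1 ≤ s) :
    (mergeStep m (s, e)).Pairwise SepIv ∧
      (∀ q ∈ mergeStep m (s, e), q.1 ≤ s) ∧
      (∀ x, covers (mergeStep m (s, e)) x ↔ covers m x ∨ (s ≤ x ∧ x ≤ e)) := by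
  rcases hLast : m.getLast? with _ | ⟨ls, le⟩
  · have hmnil : m = [] := List.getLast?_eq_none_iff.mp hLast
    subst hmnil
    refine ⟨by simp [mergeStep], by simp [mergeStep], ?_⟩
    intro x; simp [mergeStep, covers]
  · have hmem : (ls, le) ∈ m := List.mem_of_getLast? hLast
    have hls : ls ≤ s := hstart _ hmem
    have hmdecomp : m = m.dropLast ++ [(ls, le)] :=
      (List.dropLast_append_getLast? (a := (ls, le)) hLast).symm
    by_cases hcase : s ≤ le
    · have hstep : mergeStep m (s, e) = m.dropLast ++ [(ls, max le e)] := by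
        simp [mergeStep, hLast, hcase]
      rw [hstep]
      rw [hmdecomp] at hm
      rw [List.pairwise_append] at hm
      constructor
      · rw [List.pairwise_append]
        refine ⟨hm.1, by simp, ?_⟩
        intro p hp q hq
        simp only [List.mem_singleton] at hq; subst hq
        have := hm.2.2 p hp (ls, le) (by simp)
        exact ⟨this.1, this.2⟩
      constructor
      · intro q hq
        rcases List.mem_append.mp hq with h | h
        · exact hstart q (hmdecomp ▸ List.mem_append.mpr (Or.inl h))
        · simp only [List.mem_singleton] at h; subst h; exact hls
      · intro x
        rw [covers_append]
        conv_rhs => rw [hmdecomp]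
        rw [covers_append]
        have h1 : covers [(ls, max le e)] x ↔ (ls ≤ x ∧ x ≤ max le e) := by
          simp [covers]
        have h2 : covers [(ls, le)] x ↔ (ls ≤ x ∧ x ≤ le) := by simp [covers]
        rw [h1, h2]
        constructor
        · rintro (h | h)
          · exact Or.inl (Or.inl h)
          · by_cases hxle : x ≤ le
            · exact Or.inl (Or.inr ⟨h.1, hxle⟩)
            · exact Or.inr ⟨by omega, by omega⟩
        · rintro ((h | h) | h)
          · exact Or.inl h
          · exact Or.inr ⟨h.1, le_trans h.2 (le_max_left _ _)⟩
          · exact Or.inr ⟨by omega, le_trans h.2 (le_max_right _ _)⟩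
    · have hstep : mergeStep m (s, e) = m ++ [(s, e)] := by
        simp [mergeStep, hLast, hcase]
      rw [hstep]
      have hend : ∀ p ∈ m, p.2 < s := by
        intro p hp
        rw [hmdecomp] at hp
        rcases List.mem_append.mp hp with h | h
        · rw [hmdecomp] at hm
          rw [List.pairwise_append] at hm
          have := hm.2.2 p h (ls, le) (by simp)
          exact lt_of_lt_of_le this.2 hls
        · simp only [List.mem_singleton] at h; subst h; omega
      constructor
      · rw [List.pairwise_append]
        refine ⟨hm, by simp, ?_⟩
        intro p hp q hq
        simp only [List.mem_singleton] at hq; subst hq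
        exact ⟨hstart p hp, hend p hp⟩
      constructor
      · intro q hq
        rcases List.mem_append.mp hq with h | h
        · exact hstart q h
        · simp only [List.mem_singleton] at h; subst h; exact le_refl _
      · intro x
        rw [covers_append]
        have h3 : covers [(s, e)] x ↔ (s ≤ x ∧ x ≤ e) := by simp [covers]
        rw [h3]

-- the whole merge fold over a start-sorted list
lemma mergeFold_spec (l : List (Int × Int)) (m : List (Int × Int))
    (hm : m.Pairwise SepIv)
    (hl : l.Pairwise (fun p q => p.1 ≤ q.1))
    (hml : ∀ p ∈ m, ∀ r ∈ l, p.1 ≤ r.1) :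
    (l.foldl mergeStep m).Pairwise SepIv ∧
      (∀ x, covers (l.foldl mergeStep m) x ↔ covers m x ∨ covers l x) := by
  induction l generalizing m with
  | nil => refine ⟨hm, ?_⟩; intro x; simp [covers]
  | cons r rest ih =>
      obtain ⟨s, e⟩ := r
      have hl' : rest.Pairwise (fun p q => p.1 ≤ q.1) := (List.pairwise_cons.mp hl).2
      have hsl : ∀ q ∈ rest, s ≤ q.1 := fun q hq => (List.pairwise_cons.mp hl).1 q hq
      have hstart : ∀ p ∈ m, p.1 ≤ s := fun p hp => hml p hp (s, e) (by simp)
      obtain ⟨hP, hS, hC⟩ := mergeStep_spec m s e hm hstart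
      have hml' : ∀ p ∈ mergeStep m (s, e), ∀ r' ∈ rest, p.1 ≤ r'.1 :=
        fun p hp r' hr' => le_trans (hS p hp) (hsl r' hr')
      obtain ⟨h1, h2⟩ := ih (mergeStep m (s, e)) hP hl' hml'
      refine ⟨by simpa using h1, ?_⟩
      intro x
      simp only [List.foldl_cons]
      rw [h2 x, hC x]
      simp only [covers, List.mem_cons]
      constructor
      · rintro ((h | h) | h)
        · exact Or.inl h
        · exact Or.inr ⟨(s, e), Or.inl rfl, h⟩
        · obtain ⟨p, hp, hx⟩ := h; exact Or.inr ⟨p, Or.inr hp, hx⟩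
      · rintro (h | ⟨p, (hp | hp), hx⟩)
        · exact Or.inl (Or.inl h)
        · subst hp; exact Or.inl (Or.inr hx)
        · exact Or.inr ⟨p, hp, hx⟩

-- binary-search loop invariant (starts nondecreasing on [lo, hi))
lemma bsLoop_inv (a : List (Int × Int)) (x : Int)
    (hsorted : ∀ i j (_ : i < a.length) (_ : j < a.length), i ≤ j → (a[i]).1 ≤ (a[j]).1) :
    ∀ n lo hi, hi - lo ≤ n → hi ≤ a.length → lo ≤ hi →
      (∀ i (_ : i < a.length), i < lo → (a[i]).1 ≤ x) →
      (∀ i (_ : i < a.length), hi ≤ i → x < (a[i]).1) →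
      bsLoop a x lo hi ≤ a.length ∧
        (∀ i (_ : i < a.length), i < bsLoop a x lo hi → (a[i]).1 ≤ x) ∧
        (∀ i (_ : i < a.length), bsLoop a x lo hi ≤ i → x < (a[i]).1) := by
  intro n
  induction n with
  | zero =>
      intro lo hi hn hhi hlohi hlow hhigh
      have h : ¬ lo < hi := by omega
      rw [bsLoop]; simp only [h, dif_neg, not_false_iff]
      exact ⟨by omega, hlow, fun i hia hi' => hhigh i hia (by omega)⟩
  | succ n ih =>
      intro lo hi hn hhi hlohi hlow hhigh
      by_cases h : lo < hi
      · have hmidlt : (lo + hi) / 2 < a.length := by omega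
        have hget : a.getD ((lo + hi) / 2) (0, 0) = a[(lo + hi) / 2] := by
          rw [List.getD_eq_getElem?_getD, List.getElem?_eq_getElem hmidlt]; rfl
        rw [bsLoop]
        simp only [h, dif_pos]
        rw [hget]
        by_cases hx : (a[(lo + hi) / 2]).1 ≤ x
        · simp only [hx, if_pos]
          refine ih ((lo + hi) / 2 + 1) hi (by omega) hhi (by omega) ?_ hhigh
          intro i hia hi'
          exact le_trans (hsorted i ((lo + hi) / 2) hia hmidlt (by omega)) hx
        · simp only [hx, if_false]
          refine ih lo ((lo + hi) / 2) (by omega) (by omega) (by omega) hlow ?_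
          intro i hia hi'
          exact lt_of_lt_of_le (by omega : x < (a[(lo + hi) / 2]).1)
            (hsorted ((lo + hi) / 2) i hmidlt hia hi')
      · rw [bsLoop]; simp only [h, dif_neg, not_false_iff]
        exact ⟨by omega, hlow, fun i hia hi' => hhigh i hia (by omega)⟩

-- B's per-ingredient test is exactly range membership, on a SepIv-pairwise list
lemma btest_iff (m : List (Int × Int)) (hm : m.Pairwise SepIv) (x : Int) :
    (0 < bsLoop m x 0 m.length ∧ x ≤ (m.getD (bsLoop m x 0 m.length - 1) (0, 0)).2)
      ↔ covers m x := by
  have hpw := (List.pairwise_iff_getElem).mp hm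
  have hsorted : ∀ i j (_ : i < m.length) (_ : j < m.length), i ≤ j → (m[i]).1 ≤ (m[j]).1 := by
    intro i j hi hj hij
    rcases Nat.lt_or_ge i j with h | h
    · exact (hpw i j hi hj h).1
    · have : i = j := by omega
      subst this; exact le_refl _
  obtain ⟨hr1, hr2, hr3⟩ := bsLoop_inv m x hsorted m.length 0 m.length (by omega) (le_refl _)
    (by omega) (by intro i _ h; omega) (by intro i hia h; omega)
  set r := bsLoop m x 0 m.length with hr
  constructor
  · rintro ⟨hpos, hend⟩
    have hlt : r - 1 < m.length := by omega
    have hget : m.getD (r - 1) (0, 0) = m[r - 1] := by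
      rw [List.getD_eq_getElem?_getD, List.getElem?_eq_getElem hlt]; rfl
    rw [hget] at hend
    exact ⟨m[r - 1], List.getElem_mem hlt, hr2 (r - 1) hlt (by omega), hend⟩
  · rintro ⟨p, hp, hx1, hx2⟩
    obtain ⟨i, hi, hpi⟩ := List.mem_iff_getElem.mp hp
    subst hpi
    have hir : i < r := by
      by_contra h
      exact absurd hx1 (not_le.mpr (hr3 i hi (by omega)))
    have hpos : 0 < r := by omega
    have hieq : i = r - 1 := by
      by_contra h
      have hlt : r - 1 < m.length := by omega
      obtain ⟨t1, t2⟩ := hpw i (r - 1) hi hlt (by omega)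
      have hsx : (m[r - 1]).1 ≤ x := hr2 (r - 1) hlt (by omega)
      omega
    subst hieq
    have hget : m.getD (r - 1) (0, 0) = m[r - 1] := by
      rw [List.getD_eq_getElem?_getD, List.getElem?_eq_getElem hi]; rfl
    exact ⟨hpos, by rw [hget]; exact hx2⟩

-- ===== VERDICT (by name: the statement is the Claim_ definition above) =====
theorem find_fresh_ingredients_spec : Claim_equal_find_fresh_ingredients := by
  intro fr av _
  unfold Spec_find_fresh_ingredients find_fresh_ingredients find_fresh_ingredients_alt
  have hl : (PySem.List.sorted fr (fun r => r.1) false).Pairwise (fun p q => p.1 ≤ q.1) :=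
    PySem.List.sorted_pairwise fr (fun r => r.1)
  obtain ⟨hP, hC⟩ := mergeFold_spec (PySem.List.sorted fr (fun r => r.1) false) []
    (by simp) hl (by simp)
  set merged := (PySem.List.sorted fr (fun r => r.1) false).foldl mergeStep [] with hmg
  have htest : ∀ x, (0 < bsLoop merged x 0 merged.length ∧
      x ≤ (merged.getD (bsLoop merged x 0 merged.length - 1) (0, 0)).2) ↔ coversA fr x = true := by
    intro x
    rw [btest_iff merged hP x, hC x, coversA_iff]
    have : covers (PySem.List.sorted fr (fun r => r.1) false) x ↔ covers fr x := by
      simp [covers, PySem.List.mem_sorted]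
    have hnil : covers ([] : List (Int × Int)) x ↔ False := by simp [covers]
    rw [hnil, false_or]
    exact this
  have hfun : (fun (acc : List Int) (ingredient : Int) =>
      if coversA fr ingredient then PySem.Set.add acc ingredient else acc)
    = (fun (acc : List Int) (x : Int) =>
      if 0 < bsLoop merged x 0 merged.length ∧
          x ≤ (merged.getD (bsLoop merged x 0 merged.length - 1) (0, 0)).2
        then PySem.Set.add acc x else acc) := by
    funext acc x
    by_cases h : coversA fr x = true
    · rw [if_pos (by simp [h]), if_pos ((htest x).mpr h)]
    · rw [if_neg (by simp [h]), if_neg (fun hc => h ((htest x).mp hc))]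
  rw [hfun]
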